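-- pv_equiv track=rewrite | github.com/JKHira/sdsl2_coder | scripts/check_error_catalog.py | is_valid_json_pointer
-- ===== SOURCE A (Python) =====
-- def is_valid_json_pointer(path: str) -> bool:
--     if path == "":
--         return True
--     if not path.startswith("/"):
--         return False
--     i = 0
--     while i < len(path):
--         if path[i] == "~":
--             if i + 1 >= len(path) or path[i + 1] not in ("0", "1"):
--                 return False
--             i += 2
--             continue
--         i += 1
--     return True
-- ===== SOURCE B (Python) =====
-- def is_valid_json_pointer(path: str) -> bool:
--     if path == "":
--         return True
--     if not path.startswith("/"):
--         return False
--     return all(seg.startswith(("0", "1")) for seg in path.split("~")[1:])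
-- ===== Notes on version B (the rewrite author's own statement) =====
-- stated objective: idiomatic
-- what changed: Replaced the manual index-walking while loop by a staged decomposition: split the string on the tilde separator and check that every piece after the first starts with a valid escape digit.
import Mathlib
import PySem

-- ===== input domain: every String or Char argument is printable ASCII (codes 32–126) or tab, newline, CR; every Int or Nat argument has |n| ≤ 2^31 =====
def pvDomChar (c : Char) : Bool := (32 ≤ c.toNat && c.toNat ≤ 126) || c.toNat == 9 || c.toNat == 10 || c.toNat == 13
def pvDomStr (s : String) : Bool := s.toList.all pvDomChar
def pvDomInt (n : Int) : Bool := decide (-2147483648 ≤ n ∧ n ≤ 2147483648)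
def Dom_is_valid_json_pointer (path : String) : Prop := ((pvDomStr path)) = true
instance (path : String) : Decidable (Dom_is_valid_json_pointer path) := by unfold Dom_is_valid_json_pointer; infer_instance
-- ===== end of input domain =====

-- B replaces A's index-walking while loop by a staged decomposition: split the string on '~'
-- and check that every piece after the first starts with '0' or '1'; same cost, more idiomatic.

-- ===== PORT A =====
-- the 'while i < len(path)' loop of A, step for step (i += 2 past a valid escape, i += 1 otherwise)
def pvLoopA (cs : List Char) (i : Nat) : Bool :=
  if h : i < cs.length then
    if cs[i] = '~' then
      if cs.length ≤ i + 1 ∨ ¬ (cs[i+1]? = some '0' ∨ cs[i+1]? = some '1') then false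
      else pvLoopA cs (i + 2)
    else pvLoopA cs (i + 1)
  else true
termination_by cs.length - i

def is_valid_json_pointer (path : String) : Bool :=
  if path == "" then true
  else if !(PySem.Str.startswith path "/") then false
  else pvLoopA path.toList 0

-- ===== PORT B =====
-- 'seg.startswith(("0", "1"))' — for the one-character prefixes "0"/"1" this is a head test (exact)
def pvStartsOK (seg : List Char) : Bool :=
  seg.head? == some '0' || seg.head? == some '1'

def is_valid_json_pointer_alt (path : String) : Bool :=
  if path == "" then true
  else if !(PySem.Str.startswith path "/") then false
  else
    -- path.split("~")[1:] — str.split with a single-character separator is exactly List.splitOn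
    -- on the code points (empty pieces kept, result never empty), and [1:] on that list is .tail
    ((path.toList.splitOn '~').tail).all pvStartsOK

-- ===== PRECONDITION & SPEC =====
def Spec_is_valid_json_pointer (path : String) (out : Bool) : Prop := out = is_valid_json_pointer_alt path
instance (path : String) (out : Bool) : Decidable (Spec_is_valid_json_pointer path out) := by unfold Spec_is_valid_json_pointer; infer_instance

-- ===== CLAIM (what is proved, stated in full; the proofs are below) =====
def Claim_equal_is_valid_json_pointer : Prop := ∀ (path : String), Dom_is_valid_json_pointer path → Spec_is_valid_json_pointer path (is_valid_json_pointer path)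

-- ===== LEMMAS AND PROOFS =====

-- shared characterisation: every '~' is followed by '0' or '1', as a simple structural recursion
def pvOkBool : List Char → Bool
  | [] => true
  | c :: cs => (if c = '~' then pvStartsOK cs else true) && pvOkBool cs

theorem pvOkBool_cons (c : Char) (cs : List Char) :
    pvOkBool (c :: cs) = ((if c = '~' then pvStartsOK cs else true) && pvOkBool cs) := rfl

-- A's loop from index i computes pvOkBool of the remaining suffix
theorem pvLoopA_eq (cs : List Char) (i : Nat) : pvLoopA cs i = pvOkBool (cs.drop i) := by
  rw [pvLoopA]
  split
  · rename_i h
    rw [List.drop_eq_getElem_cons h]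
    split
    · rename_i htil
      split
      · rename_i hbad
        have hfalse : pvStartsOK (cs.drop (i + 1)) = false := by
          rcases Nat.lt_or_ge (i + 1) cs.length with hlt | hge
          · rcases hbad with hb | hb
            · omega
            · push Not at hb
              rw [List.drop_eq_getElem_cons hlt]
              rw [List.getElem?_eq_getElem hlt] at hb
              simp only [pvStartsOK, List.head?_cons, Bool.or_eq_false_iff,
                beq_eq_false_iff_ne, ne_eq]
              exact ⟨fun h0 => hb.1 (by rw [h0]), fun h1 => hb.2 (by rw [h1])⟩
          · rw [List.drop_eq_nil_of_le hge]; rfl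
        rw [pvOkBool_cons, htil, if_pos rfl, hfalse, Bool.false_and]
      · rename_i hok
        push Not at hok
        obtain ⟨hlt', hget⟩ := hok
        have hlt : i + 1 < cs.length := by omega
        rw [pvLoopA_eq cs (i + 2)]
        rw [List.getElem?_eq_getElem hlt] at hget
        have hdrop1 : cs.drop (i + 1) = cs[i+1] :: cs.drop (i + 2) := List.drop_eq_getElem_cons hlt
        have hne : ¬ cs[i+1] = '~' := by
          rcases hget with h0 | h0 <;> rw [Option.some_inj] at h0 <;> rw [h0] <;> decide
        have hstarts : pvStartsOK (cs.drop (i + 1)) = true := by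
          rw [hdrop1]
          simp only [pvStartsOK, List.head?_cons]
          rcases hget with h0 | h0 <;> rw [Option.some_inj] at h0 <;> simp [h0]
        rw [pvOkBool_cons, htil, if_pos rfl, hstarts, Bool.true_and,
          hdrop1, pvOkBool_cons, if_neg hne, Bool.true_and]
    · rename_i htil
      rw [pvLoopA_eq cs (i + 1)]
      rw [pvOkBool_cons, if_neg htil, Bool.true_and]
  · rename_i h
    rw [List.drop_eq_nil_of_le (by omega)]
    rfl
termination_by cs.length - i

-- B's split-and-check equals pvOkBool (proved together with the head-included variant)
theorem pvSplit_eq (cs : List Char) :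
    ((cs.splitOn '~').tail.all pvStartsOK = pvOkBool cs) ∧
    ((cs.splitOn '~').all pvStartsOK = (pvStartsOK cs && pvOkBool cs)) := by
  induction cs with
  | nil => simp [List.splitOn, List.splitOnP_nil, pvOkBool, pvStartsOK]
  | cons c cs ih =>
    obtain ⟨ihT, ihQ⟩ := ih
    have hsplit : (c :: cs).splitOn '~' = List.splitOnP (· == '~') (c :: cs) := rfl
    have hsplit' : cs.splitOn '~' = List.splitOnP (· == '~') cs := rfl
    by_cases hc : c = '~'
    · subst hc
      rw [hsplit, List.splitOnP_cons, if_pos (by decide), ← hsplit']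
      constructor
      · rw [List.tail_cons, ihQ, pvOkBool_cons, if_pos rfl]
      · rw [List.all_cons, ihQ]
        have : pvStartsOK [] = false := rfl
        rw [this, Bool.false_and]
        have : pvStartsOK ('~' :: cs) = false := by
          simp [pvStartsOK]
        rw [this, Bool.false_and]
    · rw [hsplit, List.splitOnP_cons, if_neg (by simp [hc]), ← hsplit']
      obtain ⟨s0, rest, hs⟩ : ∃ s0 rest, cs.splitOn '~' = s0 :: rest := by
        rcases h : cs.splitOn '~' with _ | ⟨s0, rest⟩
        · exact absurd (hsplit' ▸ h) (List.splitOnP_ne_nil _ _)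
        · exact ⟨s0, rest, rfl⟩
      rw [hs]
      rw [hs] at ihT ihQ
      simp only [List.modifyHead_cons, List.tail_cons, List.all_cons] at *
      have hstarts : pvStartsOK (c :: s0) = pvStartsOK (c :: cs) := by
        simp [pvStartsOK]
      constructor
      · rw [ihT, pvOkBool_cons, if_neg hc, Bool.true_and]
      · rw [ihT, hstarts, pvOkBool_cons, if_neg hc, Bool.true_and]

-- ===== VERDICT (by name: the statement is the Claim_ definition above) =====
theorem is_valid_json_pointer_spec : Claim_equal_is_valid_json_pointer := by
  intro path _
  unfold Spec_is_valid_json_pointer is_valid_json_pointer is_valid_json_pointer_alt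
  split
  · rfl
  · split
    · rfl
    · rw [pvLoopA_eq, List.drop_zero, (pvSplit_eq path.toList).1]
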